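-- pv_equiv track=rewrite | github.com/m9dswyptrn-web/SupersonicBuilder | SupersonicBuilder/tools/fix_doc_updater_fstring.py | escape_lone_braces
-- ===== SOURCE A (Python) =====
-- def escape_lone_braces(s: str) -> str:
--     out = []
--     depth = 0
--     i = 0
--     while i < len(s):
--         ch = s[i]
--         if ch == "{":
--             if i+1 < len(s) and s[i+1] == "{":
--                 out.append("{{"); i += 2; continue
--             depth += 1; out.append("{"); i += 1; continue
--         if ch == "}":
--             if i+1 < len(s) and s[i+1] == "}":
--                 out.append("}}"); i += 2; continue
--             if depth == 0:
--                 out.append("}}"); i += 1; continue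
--             depth -= 1; out.append("}"); i += 1; continue
--         out.append(ch); i += 1
--     return "".join(out)
-- ===== SOURCE B (Python) =====
-- import re
--
-- def escape_lone_braces(s: str) -> str:
--     # Tokenize first (double braces before single so greedy matching pairs '{{'/'}}' first),
--     # then one pass over tokens with a depth counter.
--     out = []
--     depth = 0
--     for t in re.findall(r'\{\{|\}\}|\{|\}|[^{}]+', s):
--         if t == '{{' or t == '}}':
--             out.append(t)
--         elif t == '{':
--             depth += 1
--             out.append('{')
--         elif t == '}':
--             if depth == 0:
--                 out.append('}}')
--             else:
--                 depth -= 1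
--                 out.append('}')
--         else:
--             out.append(t)
--     return ''.join(out)
-- ===== Notes on version B (the rewrite author's own statement) =====
-- stated objective: faster
-- what changed: Replaced the index-and-lookahead per-character scanner with a regex tokenization pass (re.findall with the double-brace alternatives first) followed by a single loop over the token list maintaining the depth counter.
import Mathlib
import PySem

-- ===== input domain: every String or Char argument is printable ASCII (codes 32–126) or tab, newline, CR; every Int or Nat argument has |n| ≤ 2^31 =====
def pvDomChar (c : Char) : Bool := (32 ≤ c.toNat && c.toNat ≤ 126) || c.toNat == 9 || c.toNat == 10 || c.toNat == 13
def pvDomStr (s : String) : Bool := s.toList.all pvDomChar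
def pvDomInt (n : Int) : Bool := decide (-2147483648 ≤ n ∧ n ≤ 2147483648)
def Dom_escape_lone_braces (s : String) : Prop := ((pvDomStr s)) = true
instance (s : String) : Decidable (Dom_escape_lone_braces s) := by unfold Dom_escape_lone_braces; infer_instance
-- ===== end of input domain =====

-- B tokenizes the string with a regex (double-brace alternatives first) and processes the token
-- list in one depth-counting pass instead of A's per-character index-and-lookahead scan; the
-- timing run measured B faster (constant-factor: the tokenization runs in C).
-- ===== PORT A =====
-- Port of A: the while-loop scanner as structural recursion over the character list
-- (out.append + continue becomes cons + recursive call; "".join(out) is the flatten at the end).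
def aGo (cs : List Char) (depth : Int) : List (List Char) :=
  match cs with
  | [] => []
  | c :: rest =>
    if c = '{' then
      if rest.head? = some '{' then ['{', '{'] :: aGo rest.tail depth
      else ['{'] :: aGo rest (depth + 1)
    else if c = '}' then
      if rest.head? = some '}' then ['}', '}'] :: aGo rest.tail depth
      else if depth = 0 then ['}', '}'] :: aGo rest depth
      else ['}'] :: aGo rest (depth - 1)
    else [c] :: aGo rest depth
termination_by cs.length
decreasing_by all_goals (simp [List.length_tail]; try omega)

def escape_lone_braces (s : String) : String := String.ofList (aGo s.toList 0).flatten


-- ===== PORT B =====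
-- Hand-written port of re.findall(r'\{\{|\}\}|\{|\}|[^{}]+', s): PySem has no regex, so the
-- greedy left-to-right alternation is transcribed exactly — double braces tried before single,
-- and [^{}]+ takes the maximal run of non-brace characters.
def pvNonBrace (c : Char) : Bool := !(c == '{' || c == '}')

def bTokenize (cs : List Char) : List (List Char) :=
  match cs with
  | [] => []
  | c :: rest =>
    if c = '{' then
      if rest.head? = some '{' then ['{', '{'] :: bTokenize rest.tail
      else ['{'] :: bTokenize rest
    else if c = '}' then
      if rest.head? = some '}' then ['}', '}'] :: bTokenize rest.tail
      else ['}'] :: bTokenize rest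
    else (c :: rest.takeWhile pvNonBrace) :: bTokenize (rest.dropWhile pvNonBrace)
termination_by cs.length
decreasing_by all_goals solve
  | (simp [List.length_tail]; omega)
  | simp
  | (simp; exact List.length_dropWhile_le _ _)

-- The for-loop over the token list with its depth counter.
def bGo (ts : List (List Char)) (depth : Int) : List (List Char) :=
  match ts with
  | [] => []
  | t :: rest =>
    if t = ['{', '{'] ∨ t = ['}', '}'] then t :: bGo rest depth
    else if t = ['{'] then ['{'] :: bGo rest (depth + 1)
    else if t = ['}'] then
      if depth = 0 then ['}', '}'] :: bGo rest depth
      else ['}'] :: bGo rest (depth - 1)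
    else t :: bGo rest depth

def escape_lone_braces_alt (s : String) : String :=
  String.ofList (bGo (bTokenize s.toList) 0).flatten

-- ===== PRECONDITION & SPEC =====
def Spec_escape_lone_braces (s : String) (out : String) : Prop := out = escape_lone_braces_alt s
instance (s : String) (out : String) : Decidable (Spec_escape_lone_braces s out) := by unfold Spec_escape_lone_braces; infer_instance

-- ===== CLAIM (what is proved, stated in full; the proofs are below) =====
def Claim_equal_escape_lone_braces : Prop := ∀ (s : String), Dom_escape_lone_braces s → Spec_escape_lone_braces s (escape_lone_braces s)

-- ===== LEMMAS AND PROOFS =====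
-- Splitting the leading non-brace run off the front commutes with tokenize-then-process.
theorem bGo_run (c : Char) (run : List Char) (ts : List (List Char)) (d : Int)
    (h1 : c ≠ '{') (h2 : c ≠ '}') :
    bGo ((c :: run) :: ts) d = (c :: run) :: bGo ts d := by
  rcases run with _ | ⟨x, xs⟩ <;> rw [bGo] <;> simp_all

theorem bGo_tok_split (cs : List Char) (d : Int) :
    (bGo (bTokenize cs) d).flatten =
      cs.takeWhile pvNonBrace ++ (bGo (bTokenize (cs.dropWhile pvNonBrace)) d).flatten := by
  rcases cs with _ | ⟨c, rest⟩
  · simp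
  · by_cases hc : pvNonBrace c = true
    · have h1 : c ≠ '{' := by rintro rfl; simp [pvNonBrace] at hc
      have h2 : c ≠ '}' := by rintro rfl; simp [pvNonBrace] at hc
      rw [List.takeWhile_cons_of_pos hc, List.dropWhile_cons_of_pos hc]
      rw [show bTokenize (c :: rest) =
            (c :: rest.takeWhile pvNonBrace) :: bTokenize (rest.dropWhile pvNonBrace) from by
          rw [bTokenize]; simp [h1, h2]]
      rw [bGo_run c _ _ d h1 h2]
      simp
    · rw [List.takeWhile_cons_of_neg hc, List.dropWhile_cons_of_neg hc]
      simp

-- Main lemma: the A scanner and B's tokenize-then-fold flatten to the same characters.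
theorem aGo_eq_bGo (cs : List Char) (d : Int) :
    (aGo cs d).flatten = (bGo (bTokenize cs) d).flatten := by
  induction cs, d using aGo.induct with
  | case1 d => simp [aGo, bTokenize, bGo]
  | case2 d rest hl ih => simp [aGo, bTokenize, bGo, hl, ih]
  | case3 d rest hl ih => simp [aGo, bTokenize, bGo, hl, ih]
  | case4 d rest hl hne ih => simp [aGo, bTokenize, bGo, hl, ih]
  | case5 rest hl hne ih => simp [aGo, bTokenize, bGo, hl, ih]
  | case6 d rest hl hd hne ih => simp [aGo, bTokenize, bGo, hl, hd, ih]
  | case7 d c rest hc hc2 ih =>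
    have hs := bGo_tok_split rest d
    rw [show aGo (c :: rest) d = [c] :: aGo rest d from by rw [aGo]; simp [hc, hc2]]
    rw [show bTokenize (c :: rest) =
          (c :: rest.takeWhile pvNonBrace) :: bTokenize (rest.dropWhile pvNonBrace) from by
        rw [bTokenize]; simp [hc, hc2]]
    rw [bGo_run c _ _ d hc hc2]
    simp only [List.flatten_cons]
    rw [ih, hs]
    simp

-- ===== VERDICT (by name: the statement is the Claim_ definition above) =====
theorem escape_lone_braces_spec : Claim_equal_escape_lone_braces := by
  intro s _
  unfold Spec_escape_lone_braces escape_lone_braces escape_lone_braces_alt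
  rw [aGo_eq_bGo]
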